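-- pv_equiv track=rewrite | github.com/e4903180/extract_pdf | confirm/fileHandle.py | check_rate
-- ===== SOURCE A (Python) =====
-- def check_rate(rate_1:str, rate_2:str, possible_rate:list):
--     '''Check that the extracted ratings are correct
--
--         Args :
--             rate_1 : (str) extracted by method 1
--             rate_2 : (str) extracted by method 2
--             possible_rate : (list) all possible ratings
--         Return :
--             rate : (str) recommend
--     '''
--     if rate_1 == rate_2:
--         return rate_1 if rate_1 != 'NULL' else 'NULL'
--     for rate in possible_rate:
--         if rate == rate_1:
--             return rate
--         elif rate == rate_2:
--             return rate
--     return 'NULL'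
-- ===== SOURCE B (Python) =====
-- def check_rate(rate_1: str, rate_2: str, possible_rate: list):
--     """Reconcile two extracted ratings: build a first-occurrence position index
--     once and compare positions, instead of scanning with early returns."""
--     if rate_1 == rate_2:
--         return rate_1
--     pos = {}
--     for i, r in enumerate(possible_rate):
--         if r not in pos:
--             pos[r] = i
--     i1 = pos.get(rate_1)
--     i2 = pos.get(rate_2)
--     if i1 is None and i2 is None:
--         return 'NULL'
--     if i2 is None:
--         return rate_1
--     if i1 is None:
--         return rate_2
--     return rate_1 if i1 < i2 else rate_2
-- ===== Notes on version B (the rewrite author's own statement) =====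
-- stated objective: alternative
-- what changed: Replaced A's early-return scan over possible_rate by building a dict of each rating's first-occurrence index once and then deciding by comparing the two looked-up positions (missing = None).
import Mathlib
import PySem

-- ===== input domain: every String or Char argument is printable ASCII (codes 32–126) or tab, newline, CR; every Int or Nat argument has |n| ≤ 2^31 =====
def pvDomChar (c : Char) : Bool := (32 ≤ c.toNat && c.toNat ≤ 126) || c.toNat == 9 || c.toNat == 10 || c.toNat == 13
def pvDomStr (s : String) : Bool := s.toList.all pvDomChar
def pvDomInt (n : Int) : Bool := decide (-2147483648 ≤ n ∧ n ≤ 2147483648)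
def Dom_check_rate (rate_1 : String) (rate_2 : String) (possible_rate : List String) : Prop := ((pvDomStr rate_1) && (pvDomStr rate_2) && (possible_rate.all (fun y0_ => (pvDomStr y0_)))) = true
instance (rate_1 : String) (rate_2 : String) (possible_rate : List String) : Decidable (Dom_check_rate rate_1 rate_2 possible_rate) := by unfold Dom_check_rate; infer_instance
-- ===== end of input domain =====

-- B replaces A's early-return scan by a dict of first-occurrence positions built once,
-- then compares the two looked-up positions (alternative decomposition, same cost).


-- ===== PORT A =====
-- the 'for rate in possible_rate' loop with its early returns
def check_rate_loop (rate_1 : String) (rate_2 : String) : List String → String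
  | [] => "NULL"
  | rate :: rest =>
    if rate = rate_1 then rate
    else if rate = rate_2 then rate
    else check_rate_loop rate_1 rate_2 rest

def check_rate (rate_1 : String) (rate_2 : String) (possible_rate : List String) : String :=
  if rate_1 = rate_2 then (if rate_1 ≠ "NULL" then rate_1 else "NULL")
  else check_rate_loop rate_1 rate_2 possible_rate

-- ===== PORT B =====
def check_rate_alt (rate_1 : String) (rate_2 : String) (possible_rate : List String) : String :=
  if rate_1 = rate_2 then rate_1
  else
    let pos := (PySem.List.enumerate possible_rate 0).foldl
      (fun d p => if d.contains p.2 then d else d.insert p.2 p.1)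
      (PySem.Dict.empty : PySem.Dict String Int)
    match pos.get? rate_1, pos.get? rate_2 with
    | none, none => "NULL"
    | some _, none => rate_1
    | none, some _ => rate_2
    | some i1, some i2 => if i1 < i2 then rate_1 else rate_2

-- ===== PRECONDITION & SPEC =====
def Spec_check_rate (rate_1 : String) (rate_2 : String) (possible_rate : List String) (out : String) : Prop := out = check_rate_alt rate_1 rate_2 possible_rate
instance (rate_1 : String) (rate_2 : String) (possible_rate : List String) (out : String) : Decidable (Spec_check_rate rate_1 rate_2 possible_rate out) := by unfold Spec_check_rate; infer_instance

-- ===== CLAIM (what is proved, stated in full; the proofs are below) =====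
def Claim_equal_check_rate : Prop := ∀ (rate_1 : String) (rate_2 : String) (possible_rate : List String), Dom_check_rate rate_1 rate_2 possible_rate → Spec_check_rate rate_1 rate_2 possible_rate (check_rate rate_1 rate_2 possible_rate)

-- ===== LEMMAS AND PROOFS =====

-- the first-occurrence dict built by B's loop answers get? with the first index (offset by the start)
theorem get?_buildPos (l : List String) (s : Int) (d : PySem.Dict String Int) (r : String) :
    ((PySem.List.enumerate l s).foldl
        (fun d p => if d.contains p.2 then d else d.insert p.2 p.1) d).get? r
      = (match d.get? r with
         | some v => some v
         | none => (PySem.List.index? l r).map (fun k => s + (k : Int))) := by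
  induction l generalizing s d with
  | nil =>
    simp [PySem.List.enumerate]
    cases d.get? r <;> simp
  | cons x xs ih =>
    rw [PySem.List.enumerate_cons]
    simp only [List.foldl_cons]
    rw [ih]
    by_cases hx : x = r
    · subst hx
      cases hd : d.get? x with
      | some v =>
        have hc : d.contains x = true := by
          rw [PySem.Dict.contains_eq_isSome_get?, hd]; rfl
        simp [hc, hd]
      | none =>
        have hc : d.contains x = false := by
          rw [PySem.Dict.contains_eq_isSome_get?, hd]; rfl
        have hix : List.idxOf? x (x :: xs) = some 0 := by
          rw [← PySem.List.index?_eq_idxOf?]; exact PySem.List.index?_cons_self x xs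
        simp [hc, PySem.Dict.get?_insert_self, hix]
    · have hidx := PySem.List.index?_cons_of_ne xs hx
      simp only [PySem.List.index?_eq_idxOf?] at hidx ⊢
      rw [hidx]
      have hstep : (if d.contains x = true then d else d.insert x s).get? r = d.get? r := by
        split
        · rfl
        · exact PySem.Dict.get?_insert_of_ne d s (fun h => hx h.symm)
      rw [hstep]
      cases d.get? r with
      | some v => simp
      | none =>
        cases List.idxOf? r xs with
        | none => simp
        | some k => simp; ring

-- A's scan decided through the two first-occurrence indices
theorem loop_eq_idx (rate_1 rate_2 : String) (h : rate_1 ≠ rate_2) (l : List String) :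
    check_rate_loop rate_1 rate_2 l
      = (match PySem.List.index? l rate_1, PySem.List.index? l rate_2 with
         | none, none => "NULL"
         | some _, none => rate_1
         | none, some _ => rate_2
         | some a, some b => if a < b then rate_1 else rate_2) := by
  induction l with
  | nil => simp [check_rate_loop, PySem.List.index?]
  | cons x xs ih =>
    by_cases h1 : x = rate_1
    · subst h1
      have h2 : x ≠ rate_2 := h
      rw [show check_rate_loop x rate_2 (x :: xs) = x by simp [check_rate_loop]]
      rw [PySem.List.index?_cons_self, PySem.List.index?_cons_of_ne xs h2]
      cases PySem.List.index? xs rate_2 <;> simp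
    · by_cases h2 : x = rate_2
      · subst h2
        rw [show check_rate_loop rate_1 x (x :: xs) = x by simp [check_rate_loop, h1]]
        rw [PySem.List.index?_cons_self, PySem.List.index?_cons_of_ne xs h1]
        cases PySem.List.index? xs rate_1 <;> simp
      · rw [show check_rate_loop rate_1 rate_2 (x :: xs)
              = check_rate_loop rate_1 rate_2 xs by simp [check_rate_loop, h1, h2]]
        rw [ih, PySem.List.index?_cons_of_ne xs h1, PySem.List.index?_cons_of_ne xs h2]
        cases PySem.List.index? xs rate_1 <;> cases PySem.List.index? xs rate_2 <;> simp

-- ===== VERDICT (by name: the statement is the Claim_ definition above) =====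
theorem check_rate_spec : Claim_equal_check_rate := by
  intro rate_1 rate_2 possible_rate _
  unfold Spec_check_rate check_rate check_rate_alt
  by_cases h : rate_1 = rate_2
  · subst h
    by_cases hn : rate_1 = "NULL" <;> simp [hn]
  · simp only [if_neg h]
    rw [loop_eq_idx rate_1 rate_2 h possible_rate]
    rw [get?_buildPos possible_rate 0 PySem.Dict.empty rate_1,
        get?_buildPos possible_rate 0 PySem.Dict.empty rate_2]
    simp only [PySem.Dict.get?_empty]
    cases PySem.List.index? possible_rate rate_1 with
    | none =>
      cases PySem.List.index? possible_rate rate_2 <;> simp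
    | some a =>
      cases PySem.List.index? possible_rate rate_2 with
      | none => simp
      | some b => simp
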